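-- pv_equiv track=rewrite | github.com/miliar/Code_Jam_Webscraper | solutions_python/Problem_120/692.py | process
-- ===== SOURCE A (Python) =====
-- def process(case):
-- 	# all units in pi cm^2
-- 	paintLeft = case[1]
-- 	canDraw = 0
-- 	currentSize = case[0] + 1
-- 	while paintLeft > 0:
-- 		paintShouldBeLeft = paintLeft - ((currentSize ** 2) - ((currentSize-1)**2))
-- 		if paintShouldBeLeft >= 0:
-- 			paintLeft = paintShouldBeLeft
-- 			canDraw += 1
-- 		else:
-- 			break
-- 		currentSize += 2
-- 	return canDraw
-- ===== SOURCE B (Python) =====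
-- def process(case):
--     paint = case[1]
--     r = case[0]
--     if paint <= 0:
--         return 0
--
--     def area(n):
--         # total paint used by the first n rings: n*(2n + 2r - 1)
--         return n * (2 * n + 2 * r - 1)
--
--     lo, hi = 0, paint + abs(r) + 1
--     while hi - lo > 1:
--         mid = (lo + hi) // 2
--         if area(mid) <= paint:
--             lo = mid
--         else:
--             hi = mid
--     return lo
-- ===== Notes on version B (the rewrite author's own statement) =====
-- stated objective: alternative
-- what changed: Replaces the ring-by-ring paint-subtraction loop by a binary search for the largest n with total ring area n*(2n+2r-1) <= paint.
import Mathlib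
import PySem

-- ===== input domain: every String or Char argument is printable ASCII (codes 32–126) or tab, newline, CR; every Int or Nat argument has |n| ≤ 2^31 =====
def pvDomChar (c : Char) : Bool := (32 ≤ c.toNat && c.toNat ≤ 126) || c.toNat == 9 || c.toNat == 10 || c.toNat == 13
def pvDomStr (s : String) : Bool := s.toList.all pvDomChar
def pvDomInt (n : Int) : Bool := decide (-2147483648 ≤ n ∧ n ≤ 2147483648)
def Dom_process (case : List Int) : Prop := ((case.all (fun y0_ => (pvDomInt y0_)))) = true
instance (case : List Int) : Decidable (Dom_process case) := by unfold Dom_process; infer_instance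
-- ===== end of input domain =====

-- B replaces A's ring-by-ring subtraction loop by a binary search for the largest
-- ring count n with total area n*(2n+2r-1) ≤ paint (objective: alternative algorithm).


-- ===== PORT A =====
-- A's while loop over the state (paintLeft, currentSize), returning the count of rings drawn.
def loopA (p s canDraw : Int) : Int :=
  if _hp : 0 < p then
    if _hge : 0 ≤ p - (s ^ 2 - (s - 1) ^ 2) then
      loopA (p - (s ^ 2 - (s - 1) ^ 2)) (s + 2) (canDraw + 1)
    else canDraw
  else canDraw
termination_by ((1 - s).toNat, p.toNat)
decreasing_by
  by_cases hs : s ≤ 0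
  · exact Prod.Lex.left _ _ (by omega)
  · have hc : s ^ 2 - (s - 1) ^ 2 = 2 * s - 1 := by ring
    rw [show (1 - (s + 2)).toNat = (1 - s).toNat from by omega]
    exact Prod.Lex.right _ (by omega)

def process (case : List Int) : Int :=
  (PySem.List.pyGet? case 1).elim 0 fun paintLeft =>
    (PySem.List.pyGet? case 0).elim 0 fun c0 => loopA paintLeft (c0 + 1) 0

-- ===== PORT B =====
-- paint used by the first n rings (Source B's `area` closure)
def areaB (r n : Int) : Int := n * (2 * n + 2 * r - 1)

-- Source B's binary-search loop over (lo, hi)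
def bsearch (r t lo hi : Int) : Int :=
  if _h : 1 < hi - lo then
    -- mid = (lo + hi) // 2 (inlined)
    if areaB r (PySem.Int.floordiv (lo + hi) 2) ≤ t then
      bsearch r t (PySem.Int.floordiv (lo + hi) 2) hi
    else bsearch r t lo (PySem.Int.floordiv (lo + hi) 2)
  else lo
termination_by (hi - lo).toNat
decreasing_by
  all_goals
    rw [PySem.Int.floordiv_eq_ediv_of_pos (by norm_num)] at *
    omega

def process_alt (case : List Int) : Int :=
  (PySem.List.pyGet? case 1).elim 0 fun paint =>
    (PySem.List.pyGet? case 0).elim 0 fun r =>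
      if paint ≤ 0 then 0 else bsearch r paint 0 (paint + |r| + 1)

-- ===== PRECONDITION & SPEC =====
-- A raises IndexError (case[1] or case[0]) when the list has fewer than two elements.
def Pre_process (case : List Int) : Prop := 2 ≤ case.length
instance (case : List Int) : Decidable (Pre_process case) := by unfold Pre_process; infer_instance
def pvWitness_process : List Int := [1, 9]

def Spec_process (case : List Int) (out : Int) : Prop := out = process_alt case
instance (case : List Int) (out : Int) : Decidable (Spec_process case out) := by unfold Spec_process; infer_instance

-- ===== CLAIM (what is proved, stated in full; the proofs are below) =====
def Claim_equal_process : Prop := ∀ (case : List Int), Dom_process case → Pre_process case → Spec_process case (process case)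

-- ===== LEMMAS AND PROOFS =====

lemma areaB_succ (r k : Int) : areaB r (k + 1) = areaB r k + (4 * k + 2 * r + 1) := by
  unfold areaB; ring

-- once the rings bracket t at n, every later prefix uses more than t
lemma after_gt (r t n : Int) (_hn : 0 ≤ n) (h1 : areaB r n ≤ t) (h2 : t < areaB r (n + 1)) :
    ∀ m : Int, n < m → t < areaB r m := by
  intro m hm
  have hcost : 0 < 4 * n + 2 * r + 1 := by
    have := areaB_succ r n; omega
  unfold areaB at *
  nlinarith [mul_nonneg (by omega : (0:ℤ) ≤ m - n - 1) (by omega : (0:ℤ) ≤ 2 * m + 2 * n + 2 * r + 1)]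

-- every prefix up to the bracket point fits in t
lemma before_le (r t n : Int) (ht : 0 < t) (hn : 0 ≤ n) (h1 : areaB r n ≤ t)
    (_h2 : t < areaB r (n + 1)) : ∀ j : Int, 0 ≤ j → j ≤ n → areaB r j ≤ t := by
  have key : ∀ m : ℕ, (m : Int) ≤ n → areaB r (m : Int) ≤ t := by
    intro m
    induction m with
    | zero => intro _; simp [areaB]; omega
    | succ m ih =>
      intro hle
      by_contra hgt
      have hm : (m : Int) ≤ n := by push_cast at hle ⊢; omega
      have hb : t < areaB r ((m : Int) + 1) := by push_cast at hgt ⊢; omega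
      have := after_gt r (t) (m : Int) (by positivity) (ih hm) hb n (by push_cast at hle; omega)
      omega
  intro j hj0 hjn
  have := key j.toNat (by omega)
  rwa [Int.toNat_of_nonneg hj0] at this
-- strictly below the bracket point there is paint strictly left
lemma before_lt (r t n : Int) (ht : 0 < t) (hn : 0 ≤ n) (h1 : areaB r n ≤ t)
    (h2 : t < areaB r (n + 1)) : ∀ j : Int, 0 ≤ j → j < n → areaB r j < t := by
  intro j hj0 hjn
  have hle := before_le r t n ht hn h1 h2 j hj0 (by omega)
  rcases lt_or_eq_of_le hle with h | h
  · exact h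
  · exfalso
    have hnext := before_le r t n ht hn h1 h2 (j + 1) (by omega) (by omega)
    have hcost : 4 * j + 2 * r + 1 ≤ 0 := by have := areaB_succ r j; omega
    have : areaB r j ≤ 0 := by
      unfold areaB
      nlinarith [mul_nonneg hj0 (by omega : (0:ℤ) ≤ -(2 * j + 2 * r - 1))]
    omega

-- A's loop, started after k rings, draws exactly the remaining n - k rings
lemma loopA_eq (r t n : Int) (ht : 0 < t) (hn : 0 ≤ n) (h1 : areaB r n ≤ t)
    (h2 : t < areaB r (n + 1)) :
    ∀ (d : ℕ) (k acc : Int), 0 ≤ k → k ≤ n → n - k = (d : Int) →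
      loopA (t - areaB r k) (r + 1 + 2 * k) acc = acc + (n - k) := by
  intro d
  induction d with
  | zero =>
    intro k acc hk0 hkn hd
    have hkn' : k = n := by omega
    subst hkn'
    rw [loopA.eq_def]
    have hcost : (r + 1 + 2 * k) ^ 2 - (r + 1 + 2 * k - 1) ^ 2 = 4 * k + 2 * r + 1 := by ring
    have hs := areaB_succ r k
    by_cases hp : 0 < t - areaB r k
    · rw [dif_pos hp, dif_neg (show ¬ (0:ℤ) ≤ t - areaB r k - ((r + 1 + 2 * k) ^ 2 - (r + 1 + 2 * k - 1) ^ 2) by rw [hcost]; omega)]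
      omega
    · rw [dif_neg hp]
      omega
  | succ d ih =>
    intro k acc hk0 hkn hd
    have hklt : k < n := by omega
    have hp : 0 < t - areaB r k := by
      have := before_lt r t n ht hn h1 h2 k hk0 hklt; omega
    rw [loopA.eq_def]
    have hcost : (r + 1 + 2 * k) ^ 2 - (r + 1 + 2 * k - 1) ^ 2 = 4 * k + 2 * r + 1 := by ring
    have hs := areaB_succ r k
    have hnext : areaB r (k + 1) ≤ t :=
      before_le r t n ht hn h1 h2 (k + 1) (by omega) (by omega)
    rw [dif_pos hp, dif_pos (show (0:ℤ) ≤ t - areaB r k - ((r + 1 + 2 * k) ^ 2 - (r + 1 + 2 * k - 1) ^ 2) by rw [hcost]; omega)]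
    have hrec := ih (k + 1) (acc + 1) (by omega) (by omega) (by omega)
    have harg : t - areaB r k - ((r + 1 + 2 * k) ^ 2 - (r + 1 + 2 * k - 1) ^ 2)
        = t - areaB r (k + 1) := by rw [hcost]; omega
    have hsz : r + 1 + 2 * k + 2 = r + 1 + 2 * (k + 1) := by ring
    rw [harg, hsz, hrec]
    omega

-- Source B's binary search returns a bracketing index
lemma bsearch_spec (r t : Int) :
    ∀ (d : ℕ) (lo hi : Int), (hi - lo).toNat ≤ d → 0 ≤ lo → lo < hi →
      areaB r lo ≤ t → t < areaB r hi →
      0 ≤ bsearch r t lo hi ∧ areaB r (bsearch r t lo hi) ≤ t ∧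
        t < areaB r (bsearch r t lo hi + 1) := by
  intro d
  induction d with
  | zero => intro lo hi hd _ hlt _ _; omega
  | succ d ih =>
    intro lo hi hd hlo hlt hL hH
    rw [bsearch.eq_def]
    split_ifs with hgap hmid
    · have hm := PySem.Int.floordiv_eq_ediv_of_pos (a := lo + hi) (b := 2) (by norm_num)
      have hbnd : lo + 1 ≤ PySem.Int.floordiv (lo + hi) 2 ∧
          PySem.Int.floordiv (lo + hi) 2 ≤ hi - 1 := by rw [hm]; omega
      exact ih _ hi (by omega) (by omega) (by omega) hmid hH
    · have hm := PySem.Int.floordiv_eq_ediv_of_pos (a := lo + hi) (b := 2) (by norm_num)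
      have hbnd : lo + 1 ≤ PySem.Int.floordiv (lo + hi) 2 ∧
          PySem.Int.floordiv (lo + hi) 2 ≤ hi - 1 := by rw [hm]; omega
      exact ih lo _ (by omega) hlo (by omega) hL (by omega)
    · have hhi : hi = lo + 1 := by omega
      exact ⟨hlo, hL, by rw [← hhi]; exact hH⟩

-- ===== VERDICT (by name: the statement is the Claim_ definition above) =====
theorem process_spec : Claim_equal_process := by
  intro case _hdom hpre
  unfold Spec_process
  unfold Pre_process at hpre
  match case with
  | a :: b :: rest =>
    have hg0 : PySem.List.pyGet? (a :: b :: rest) 0 = some a :=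
      PySem.List.pyGet?_zero_cons a (b :: rest)
    have hg1 : PySem.List.pyGet? (a :: b :: rest) 1 = some b := by
      rw [show (1:Int) = ((1:Nat):Int) from rfl, PySem.List.pyGet?_natCast]
      simp
    unfold process process_alt
    rw [hg0, hg1]
    simp only [Option.elim]
    by_cases hb : b ≤ 0
    · simp only [if_pos hb]
      rw [loopA.eq_def]
      simp [show ¬ (0 < b) from by omega]
    · simp only [if_neg hb]
      replace hb : 0 < b := by omega
      set H := b + |a| + 1 with hH
      have habs : 0 ≤ |a| ∧ -|a| ≤ a := ⟨abs_nonneg a, neg_abs_le a⟩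
      have hHpos : 0 < H := by omega
      have hL : areaB a 0 ≤ b := by simp [areaB]; omega
      have hHgt : b < areaB a H := by
        unfold areaB
        nlinarith [mul_pos hHpos (show (0:ℤ) < 2 * H + 2 * a - 1 from by omega)]
      obtain ⟨hv0, hv1, hv2⟩ :=
        bsearch_spec a b H.toNat 0 H (by omega) le_rfl hHpos hL hHgt
      calc loopA b (a + 1) 0
          = loopA (b - areaB a 0) (a + 1 + 2 * 0) 0 := by
            simp only [areaB]; ring_nf
        _ = 0 + (bsearch a b 0 H - 0) := by
            exact loopA_eq a b (bsearch a b 0 H) hb hv0 hv1 hv2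
              (bsearch a b 0 H).toNat 0 0 le_rfl hv0 (by omega)
        _ = bsearch a b 0 H := by ring
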